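-- pv_equiv track=rewrite | github.com/zentralabsai/zentra-ai | app.py | wants_insurance_help
-- ===== SOURCE A (Python) =====
-- def wants_insurance_help(text: str) -> bool:
--     text = text.lower()
--     insurance_keywords = [
--         "help checking",
--         "help with insurance",
--         "check insurance",
--         "not filed",
--         "haven't filed",
--         "have not filed",
--         "unsure about insurance",
--         "need help checking",
--         "want help checking",
--         "yes i want help checking",
--         "help checking on that",
--         "insurance help",
--     ]
--     return any(keyword in text for keyword in insurance_keywords)
-- ===== SOURCE B (Python) =====
-- KEYWORDS = (
--     "help checking",
--     "help with insurance",
--     "check insurance",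
--     "not filed",
--     "haven't filed",
--     "have not filed",
--     "unsure about insurance",
--     "need help checking",
--     "want help checking",
--     "yes i want help checking",
--     "help checking on that",
--     "insurance help",
-- )
--
-- def wants_insurance_help(text: str) -> bool:
--     t = text.lower()
--     # one left-to-right pass over positions; at each position test the keywords as prefixes
--     return any(t.startswith(k, i) for i in range(len(t)) for k in KEYWORDS)
-- ===== Notes on version B (the rewrite author's own statement) =====
-- stated objective: alternative
-- what changed: Instead of twelve independent substring scans ('k in text' per keyword), B lowercases once and makes a single left-to-right pass over text positions, testing the keywords as prefixes at each position.
import Mathlib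
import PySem

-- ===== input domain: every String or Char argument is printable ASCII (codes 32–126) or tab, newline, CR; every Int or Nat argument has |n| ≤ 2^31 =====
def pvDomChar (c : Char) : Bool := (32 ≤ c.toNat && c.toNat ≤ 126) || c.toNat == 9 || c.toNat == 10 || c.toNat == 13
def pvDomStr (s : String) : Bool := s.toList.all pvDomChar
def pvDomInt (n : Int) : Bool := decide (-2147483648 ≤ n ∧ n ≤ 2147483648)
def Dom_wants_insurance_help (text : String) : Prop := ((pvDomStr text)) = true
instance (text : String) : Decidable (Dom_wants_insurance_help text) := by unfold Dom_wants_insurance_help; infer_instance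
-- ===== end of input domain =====

-- B replaces twelve independent 'keyword in text' scans by ONE pass over positions testing the
-- keywords as prefixes at each position (objective: alternative; same asymptotic cost).

-- ===== PORT A =====
def pvKeywords : List String :=
  [ "help checking", "help with insurance", "check insurance", "not filed",
    "haven't filed", "have not filed", "unsure about insurance", "need help checking",
    "want help checking", "yes i want help checking", "help checking on that",
    "insurance help" ]

-- any(keyword in text for keyword in insurance_keywords) after text = text.lower()
def wants_insurance_help (text : String) : Bool :=
  let t := PySem.Str.lower text
  pvKeywords.any (fun k => PySem.Str.isIn k t)

-- ===== PORT B =====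
-- B's single pass: walk the suffixes of the lowered text (one per start position i < len(t));
-- at each, test every keyword as a prefix (t.startswith(k, i)).
def pvScanAny (kws : List (List Char)) : List Char → Bool
  | [] => false
  | c :: cs => kws.any (fun k => k.isPrefixOf (c :: cs)) || pvScanAny kws cs

def wants_insurance_help_alt (text : String) : Bool :=
  let t := PySem.Str.lower text
  pvScanAny (pvKeywords.map String.toList) t.toList

-- ===== PRECONDITION & SPEC =====
def Spec_wants_insurance_help (text : String) (out : Bool) : Prop := out = wants_insurance_help_alt text
instance (text : String) (out : Bool) : Decidable (Spec_wants_insurance_help text out) := by unfold Spec_wants_insurance_help; infer_instance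

-- ===== CLAIM (what is proved, stated in full; the proofs are below) =====
def Claim_equal_wants_insurance_help : Prop := ∀ (text : String), Dom_wants_insurance_help text → Spec_wants_insurance_help text (wants_insurance_help text)

-- ===== LEMMAS AND PROOFS =====

-- pvScanAny finds a nonempty keyword iff some keyword is a prefix of some suffix.
theorem pvScanAny_iff (kws : List (List Char)) (hne : ∀ k ∈ kws, k ≠ []) :
    ∀ s : List Char, pvScanAny kws s = true ↔ ∃ k ∈ kws, ∃ j, k <+: s.drop j := by
  intro s
  induction s with
  | nil =>
    simp only [pvScanAny, List.drop_nil]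
    constructor
    · intro h; cases h
    · rintro ⟨k, hk, j, hpre⟩
      exact absurd (List.prefix_nil.mp hpre) (hne k hk)
  | cons c cs ih =>
    simp only [pvScanAny, Bool.or_eq_true, List.any_eq_true, ih]
    constructor
    · rintro (⟨k, hk, hpre⟩ | ⟨k, hk, j, hpre⟩)
      · exact ⟨k, hk, 0, by simpa using (List.isPrefixOf_iff_prefix.mp hpre)⟩
      · exact ⟨k, hk, j + 1, by simpa using hpre⟩
    · rintro ⟨k, hk, j, hpre⟩
      cases j with
      | zero => exact Or.inl ⟨k, hk, List.isPrefixOf_iff_prefix.mpr (by simpa using hpre)⟩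
      | succ j => exact Or.inr ⟨k, hk, j, by simpa using hpre⟩

-- ===== VERDICT (by name: the statement is the Claim_ definition above) =====
theorem wants_insurance_help_spec : Claim_equal_wants_insurance_help := by
  intro text _
  unfold Spec_wants_insurance_help
  unfold wants_insurance_help wants_insurance_help_alt
  rw [Bool.eq_iff_iff]
  rw [pvScanAny_iff _ (by decide)]
  simp only [List.any_eq_true, PySem.Str.isIn_eq, PySem.Chars.isIn_iff_infix,
    List.mem_map]
  constructor
  · rintro ⟨k, hk, hinf⟩
    rw [List.infix_iff_prefix_suffix] at hinf
    obtain ⟨t, hpt, hts⟩ := hinf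
    have hj := List.suffix_iff_eq_drop.mp hts
    exact ⟨k.toList, ⟨k, hk, rfl⟩, _, hj ▸ hpt⟩
  · rintro ⟨kl, ⟨k, hk, rfl⟩, j, hpre⟩
    exact ⟨k, hk, hpre.isInfix.trans (List.drop_suffix j _).isInfix⟩
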